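-- pv_equiv track=rewrite | github.com/bunkahle/Transcrypt-Examples | tetris/tetris_minimal.py | chkBoard
-- ===== SOURCE A (Python) =====
-- def chkBoard(FELD, ROWS, COLS, score): # kill full lines and increase score
--     deleted = True
--     while deleted:
--         deleted = False
--         for i in range(ROWS):
--             if not "." in FELD[i]:
--                 FELD.pop(i)
--                 FELD.insert(0, "|"+"."*COLS+"|")
--                 score = score + COLS
--                 deleted = True
--                 break
--     return score
-- ===== SOURCE B (Python) =====
-- def chkBoard(FELD, ROWS, COLS, score):
--     # single pass: keep the rows that still have an empty cell, refill the top
--     if ROWS <= 0: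
--         return score
--     kept = [row for row in FELD[:ROWS] if "." in row]
--     cleared = ROWS - len(kept)
--     FELD[:ROWS] = ["|" + "." * COLS + "|"] * cleared + kept
--     return score + cleared * COLS
-- ===== Notes on version B (the rewrite author's own statement) =====
-- stated objective: faster
-- what changed: Replaces the restart-the-whole-scan-after-each-deletion while/for loop by a single filtering pass that keeps the non-full rows and computes the number of cleared lines at once.
import Mathlib
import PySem

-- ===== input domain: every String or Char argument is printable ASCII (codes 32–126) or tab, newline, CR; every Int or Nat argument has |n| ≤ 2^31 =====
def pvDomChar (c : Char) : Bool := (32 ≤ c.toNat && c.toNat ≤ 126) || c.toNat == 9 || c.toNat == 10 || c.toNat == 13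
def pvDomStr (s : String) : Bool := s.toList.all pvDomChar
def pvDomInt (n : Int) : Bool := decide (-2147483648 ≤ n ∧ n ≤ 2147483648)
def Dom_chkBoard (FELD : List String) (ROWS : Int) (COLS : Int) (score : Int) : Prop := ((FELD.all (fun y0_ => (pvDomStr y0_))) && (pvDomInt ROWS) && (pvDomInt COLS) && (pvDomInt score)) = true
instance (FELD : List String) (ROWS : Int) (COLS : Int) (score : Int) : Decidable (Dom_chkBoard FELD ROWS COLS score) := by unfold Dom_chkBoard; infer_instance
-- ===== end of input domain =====

-- B clears all full lines in one filtering pass instead of A's restart-the-scan-after-each-deletion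
-- loop (faster); both Pythons mutate FELD the same way on Pre_, the theorem is about the returned score.

-- ===== PORT A =====
-- "|"+"."*COLS+"|" ; str*int has no PySem primitive: ported by hand ('.'*COLS repeats max(COLS,0) times, exact)
def pvNewRow (COLS : Int) : String := String.ofList ('|' :: (PySem.List.pyRepeat ['.'] COLS ++ ['|']))

-- the inner 'for i in range(ROWS): if not "." in FELD[i]: …; break' — the index it breaks at
def pvScan (FELD : List String) (ROWS : Int) (i : Int) : Option Int :=
  if _h : i < ROWS then
    match PySem.List.pyGet? FELD i with
    | none => none          -- Python raises IndexError here (excluded by Pre_)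
    | some row => if PySem.Str.isIn "." row then pvScan FELD ROWS (i + 1) else some i
  else none
termination_by (ROWS - i).toNat
decreasing_by omega

-- the outer 'while deleted' loop; fuel makes it total, FELD.length + 1 suffices on Pre_
def pvLoop (fuel : Nat) (FELD : List String) (ROWS : Int) (COLS : Int) (score : Int) : Int :=
  match fuel with
  | 0 => score
  | fuel + 1 =>
    match pvScan FELD ROWS 0 with
    | none => score
    | some i =>
      match PySem.List.pop? FELD i with
      | none => score       -- unreachable: pvScan returned an in-range index
      | some (_, rest) =>
          pvLoop fuel (PySem.List.insert rest 0 (pvNewRow COLS)) ROWS COLS (score + COLS)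

def chkBoard (FELD : List String) (ROWS : Int) (COLS : Int) (score : Int) : Int :=
  pvLoop (FELD.length + 1) FELD ROWS COLS score

-- ===== PORT B =====
def chkBoard_alt (FELD : List String) (ROWS : Int) (COLS : Int) (score : Int) : Int :=
  if ROWS ≤ 0 then score
  else
    let kept := (PySem.List.slice FELD none (some ROWS)).filter (fun row => PySem.Str.isIn "." row)
    let cleared : Int := ROWS - kept.length
    score + cleared * COLS

-- ===== PRECONDITION & SPEC =====
-- Pre_ excludes exactly the inputs on which A does not return: ROWS > len(FELD) (IndexError), and
-- COLS ≤ 0 together with some row without "." among the first ROWS rows (the row A then inserts,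
-- "||", contains no "." either, so A's while loop never terminates).
def Pre_chkBoard (FELD : List String) (ROWS : Int) (COLS : Int) (score : Int) : Prop :=
  0 < ROWS →
    (ROWS ≤ FELD.length ∧
      (1 ≤ COLS ∨ ∀ row ∈ FELD.take ROWS.toNat, PySem.Str.isIn "." row = true))
instance (FELD : List String) (ROWS : Int) (COLS : Int) (score : Int) : Decidable (Pre_chkBoard FELD ROWS COLS score) := by unfold Pre_chkBoard; infer_instance

def pvWitness_chkBoard : List String × Int × Int × Int := (["|..|", "|##|"], 2, 2, 0)

def Spec_chkBoard (FELD : List String) (ROWS : Int) (COLS : Int) (score : Int) (out : Int) : Prop := out = chkBoard_alt FELD ROWS COLS score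
instance (FELD : List String) (ROWS : Int) (COLS : Int) (score : Int) (out : Int) : Decidable (Spec_chkBoard FELD ROWS COLS score out) := by unfold Spec_chkBoard; infer_instance

-- ===== CLAIM (what is proved, stated in full; the proofs are below) =====
def Claim_equal_chkBoard : Prop := ∀ (FELD : List String) (ROWS : Int) (COLS : Int) (score : Int), Dom_chkBoard FELD ROWS COLS score → Pre_chkBoard FELD ROWS COLS score → Spec_chkBoard FELD ROWS COLS score (chkBoard FELD ROWS COLS score)

-- ===== LEMMAS AND PROOFS =====

-- "row is full" (no '.'), the rows A deletes
def pvFull (row : String) : Bool := !(PySem.Str.isIn "." row)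

lemma pvCountP_compl {α : Type} (p : α → Bool) (l : List α) :
    l.countP p + l.countP (fun x => !p x) = l.length := by
  induction l with
  | nil => rfl
  | cons a t ih => by_cases h : p a <;> simp [h] <;> omega

lemma pvNewRow_notFull (COLS : Int) (h : 1 ≤ COLS) : pvFull (pvNewRow COLS) = false := by
  have hin : PySem.Str.isIn "." (pvNewRow COLS) = true := by
    rw [PySem.Str.isIn_iff_infix]
    have hmem : ('.' : Char) ∈ (pvNewRow COLS).toList := by
      simp [pvNewRow, PySem.List.pyRepeat_singleton, List.mem_replicate]
      omega
    obtain ⟨s, t, hst⟩ := List.append_of_mem hmem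
    exact ⟨s, t, by rw [hst]; simp⟩
  simp only [pvFull, hin, Bool.not_true]

lemma pvCntErase {α : Type} (p : α → Bool) :
    ∀ (l : List α) (j S : Nat) (x : α), j ≤ S → l[j]? = some x → S < l.length →
      List.countP p (List.take S (l.eraseIdx j)) + (if p x then 1 else 0)
        = List.countP p (List.take (S + 1) l) := by
  intro l
  induction l with
  | nil => intro j S x hj hx hS; simp at hS
  | cons a t ih =>
      intro j S x hj hx hS
      cases j with
      | zero =>
          simp at hx
          subst hx
          simp [List.countP_cons]
      | succ j =>
          cases S with
          | zero => omega
          | succ S =>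
              simp only [List.getElem?_cons_succ] at hx
              have := ih j S x (by omega) hx (by simpa using hS)
              simp only [List.eraseIdx_cons_succ, List.take_succ_cons, List.countP_cons]
              omega

lemma pvScan_some (FELD : List String) (ROWS i j : Int)
    (h : pvScan FELD ROWS i = some j) :
    i ≤ j ∧ j < ROWS ∧ ∃ row, PySem.List.pyGet? FELD j = some row ∧ pvFull row = true := by
  fun_induction pvScan FELD ROWS i with
  | case2 i hi row hget hin ih =>
      obtain ⟨h1, h2, h3⟩ := ih h
      exact ⟨by omega, h2, h3⟩
  | case3 i hi row hget hin =>
      rw [Option.some_inj] at h; subst h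
      exact ⟨le_refl _, hi, row, hget, by simp [pvFull]; simpa using hin⟩
  | case1 i hi hget => simp at h
  | case4 i hi => simp at h

lemma pvScan_none (FELD : List String) (ROWS i : Int) (h0 : 0 ≤ i)
    (hlen : ROWS ≤ FELD.length) (h : pvScan FELD ROWS i = none) :
    ∀ j : Int, i ≤ j → j < ROWS → ∀ row, PySem.List.pyGet? FELD j = some row →
      PySem.Str.isIn "." row = true := by
  fun_induction pvScan FELD ROWS i with
  | case2 i hi row hget hin ih =>
      intro j hij hjR row' hget'
      rcases eq_or_lt_of_le hij with rfl | hlt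
      · rw [hget] at hget'
        cases Option.some_inj.mp hget'
        exact hin
      · exact ih (by omega) h j (by omega) hjR row' hget'
  | case3 i hi row hget hin => simp at h
  | case1 i hi hget =>
      exfalso
      have hcast : ((i.toNat : Int)) = i := by omega
      rw [← hcast, PySem.List.pyGet?_natCast] at hget
      have hlt : i.toNat < FELD.length := by omega
      simp [List.getElem?_eq_getElem hlt] at hget
  | case4 i hi => intro j hij hjR; omega

lemma pvScan_none_of_all (FELD : List String) (ROWS i : Int)
    (hall : ∀ j : Int, i ≤ j → j < ROWS → ∀ row, PySem.List.pyGet? FELD j = some row →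
      PySem.Str.isIn "." row = true) :
    pvScan FELD ROWS i = none := by
  fun_induction pvScan FELD ROWS i with
  | case2 i hi row hget hin ih =>
      exact ih (fun j hij hjR row' hget' => hall j (by omega) hjR row' hget')
  | case3 i hi row hget hin =>
      exact absurd (hall i le_rfl hi row hget) hin
  | case1 i hi hget => rfl
  | case4 i hi => rfl

lemma pvLoop_eq (ROWS COLS : Int) (hR : 0 < ROWS) :
    ∀ (d : Nat) (FELD : List String) (score : Int) (fuel : Nat),
      ROWS ≤ FELD.length →
      (1 ≤ COLS ∨ d = 0) →
      List.countP pvFull (FELD.take ROWS.toNat) = d →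
      d < fuel →
      pvLoop fuel FELD ROWS COLS score = score + d * COLS := by
  intro d
  induction d with
  | zero =>
      intro FELD score fuel hlen _ hcnt hfuel
      obtain ⟨f, rfl⟩ : ∃ f, fuel = f + 1 := ⟨fuel - 1, by omega⟩
      have hnone : pvScan FELD ROWS 0 = none := by
        apply pvScan_none_of_all
        intro j hij hjR row hget
        have hj : j = ((j.toNat : Nat) : Int) := by omega
        rw [hj, PySem.List.pyGet?_natCast] at hget
        have hjlen : j.toNat < FELD.length := by omega
        rw [List.getElem?_eq_getElem hjlen] at hget
        have hmem : FELD[j.toNat] ∈ FELD.take ROWS.toNat := by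
          have h1 : j.toNat < (FELD.take ROWS.toNat).length := by simp; omega
          have h2 : (FELD.take ROWS.toNat)[j.toNat] = FELD[j.toNat] := List.getElem_take
          rw [← h2]; exact List.getElem_mem h1
        have hnf := List.countP_eq_zero.mp hcnt _ hmem
        cases Option.some_inj.mp hget
        simpa [pvFull] using hnf
      simp [pvLoop, hnone]
  | succ d ih =>
      intro FELD score fuel hlen hdisj hcnt hfuel
      have hC : 1 ≤ COLS := hdisj.resolve_right (by omega)
      obtain ⟨f, rfl⟩ : ∃ f, fuel = f + 1 := ⟨fuel - 1, by omega⟩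
      match hscan : pvScan FELD ROWS 0 with
      | none =>
          exfalso
          have hall := pvScan_none FELD ROWS 0 le_rfl hlen hscan
          have hzero : List.countP pvFull (FELD.take ROWS.toNat) = 0 := by
            apply List.countP_eq_zero.mpr
            intro row hrow
            obtain ⟨k, hk, hkeq⟩ := List.getElem_of_mem hrow
            have hklen : k < FELD.length := by simp at hk; omega
            have hkR : k < ROWS.toNat := by simp at hk; omega
            have hrow' : PySem.List.pyGet? FELD (k : Int) = some FELD[k] := by
              rw [PySem.List.pyGet?_natCast, List.getElem?_eq_getElem hklen]
            have := hall (k : Int) (by omega) (by omega) FELD[k] hrow'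
            rw [← hkeq]
            have h2 : (FELD.take ROWS.toNat)[k] = FELD[k] := List.getElem_take
            rw [h2]
            simp [pvFull]
            simpa using this
          omega
      | some j =>
          obtain ⟨h0j, hjR, row, hget, hfull⟩ := pvScan_some FELD ROWS 0 j hscan
          have hjn : j = ((j.toNat : Nat) : Int) := by omega
          have hjlen : j.toNat < FELD.length := by omega
          have hpop : PySem.List.pop? FELD j = some (FELD[j.toNat], FELD.eraseIdx j.toNat) := by
            have hp := PySem.List.pop?_natCast (xs := FELD) (n := j.toNat) hjlen
            rw [← hjn] at hp
            exact hp
          rw [hjn, PySem.List.pyGet?_natCast, List.getElem?_eq_getElem hjlen] at hget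
          cases Option.some_inj.mp hget
          have hcnt' : List.countP pvFull
              ((pvNewRow COLS :: FELD.eraseIdx j.toNat).take ROWS.toNat) = d := by
            have h1 : ROWS.toNat = (ROWS.toNat - 1) + 1 := by omega
            have herase := pvCntErase pvFull FELD j.toNat (ROWS.toNat - 1) (FELD[j.toNat])
              (by omega) (List.getElem?_eq_getElem hjlen) (by omega)
            rw [h1, List.take_succ_cons, List.countP_cons,
              pvNewRow_notFull COLS hC]
            rw [← h1] at herase
            rw [hfull] at herase
            simp only [Bool.false_eq_true, if_false, if_true] at herase ⊢
            omega
          have hlen' : ROWS ≤ (pvNewRow COLS :: FELD.eraseIdx j.toNat).length := by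
            simp [List.length_eraseIdx_of_lt hjlen]; omega
          have hrec := ih (pvNewRow COLS :: FELD.eraseIdx j.toNat) (score + COLS) f
            hlen' (Or.inl hC) hcnt' (by omega)
          simp only [pvLoop, hscan, hpop, PySem.List.insert_zero]
          rw [hrec]
          push_cast
          ring

-- ===== VERDICT (by name: the statement is the Claim_ definition above) =====
theorem chkBoard_spec : Claim_equal_chkBoard := by
  intro FELD ROWS COLS score _hdom hpre
  unfold Spec_chkBoard chkBoard chkBoard_alt
  by_cases hR : ROWS ≤ 0
  · have hnone : pvScan FELD ROWS 0 = none :=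
      pvScan_none_of_all FELD ROWS 0 (fun j hij hjR => by omega)
    simp [pvLoop, hnone, hR]
  · push Not at hR
    obtain ⟨hlen, hdisj⟩ := hpre hR
    have hdisj' : 1 ≤ COLS ∨ List.countP pvFull (FELD.take ROWS.toNat) = 0 := by
      rcases hdisj with h | h
      · exact Or.inl h
      · right
        apply List.countP_eq_zero.mpr
        intro row hrow
        simp [pvFull]
        simpa using h row hrow
    have hdlen : List.countP pvFull (FELD.take ROWS.toNat) ≤ FELD.length :=
      le_trans List.countP_le_length (by rw [List.length_take]; omega)
    rw [pvLoop_eq ROWS COLS hR (List.countP pvFull (FELD.take ROWS.toNat)) FELD score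
      (FELD.length + 1) hlen hdisj' rfl (by omega)]
    rw [if_neg (by omega)]
    dsimp only
    rw [PySem.List.slice_to FELD (b := ROWS) (by omega)]
    have hfl : ((FELD.take ROWS.toNat).filter (fun row => PySem.Str.isIn "." row)).length
        = (FELD.take ROWS.toNat).length - List.countP pvFull (FELD.take ROWS.toNat) := by
      have hcc := pvCountP_compl (fun row => PySem.Str.isIn "." row) (FELD.take ROWS.toNat)
      rw [← List.countP_eq_length_filter]
      have hd2 : List.countP (fun x => !(PySem.Str.isIn "." x)) (FELD.take ROWS.toNat)
          = List.countP pvFull (FELD.take ROWS.toNat) := rfl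
      omega
    rw [hfl]
    have hlenR : (FELD.take ROWS.toNat).length = ROWS.toNat := by simp; omega
    have hdR : List.countP pvFull (FELD.take ROWS.toNat) ≤ ROWS.toNat := by
      have := List.countP_le_length (l := FELD.take ROWS.toNat) (p := pvFull)
      omega
    rw [hlenR]
    have hcast : ((ROWS.toNat - List.countP pvFull (FELD.take ROWS.toNat) : Nat) : Int)
        = (ROWS.toNat : Int) - (List.countP pvFull (FELD.take ROWS.toNat) : Int) := by
      omega
    rw [hcast]
    have hRR : ((ROWS.toNat : Nat) : Int) = ROWS := by omega
    rw [hRR]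
    ring
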